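-- pv_equiv track=rewrite | github.com/jwgbradford/advent_of_code_2021 | day_1_2.py | count_value_changes
-- ===== SOURCE A (Python) =====
-- def count_value_changes(my_list):
--     getting_bigger = 0
--     the_same = 0
--     getting_smaller = 0
--     for index in range(1, len(my_list)):
--         if int(my_list[index]) > int(my_list[index - 1]):
--             getting_bigger += 1
--         elif int(my_list[index]) == int(my_list[index - 1]):
--             the_same += 1
--         elif int(my_list[index]) < int(my_list[index - 1]):
--             getting_smaller += 1
--     return getting_bigger, the_same, getting_smaller
-- ===== SOURCE B (Python) =====
-- def count_value_changes(my_list):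
--     diffs = [int(b) - int(a) for a, b in zip(my_list, my_list[1:])]
--     bigger = sum(1 for d in diffs if d > 0)
--     same = sum(1 for d in diffs if d == 0)
--     smaller = sum(1 for d in diffs if d < 0)
--     return bigger, same, smaller
-- ===== Notes on version B (the rewrite author's own statement) =====
-- stated objective: simpler
-- what changed: Replaces the fused index loop with three branches by an intermediate adjacent-differences table (zip of the list with its tail) and three independent sign-counting passes over it.
import Mathlib
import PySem

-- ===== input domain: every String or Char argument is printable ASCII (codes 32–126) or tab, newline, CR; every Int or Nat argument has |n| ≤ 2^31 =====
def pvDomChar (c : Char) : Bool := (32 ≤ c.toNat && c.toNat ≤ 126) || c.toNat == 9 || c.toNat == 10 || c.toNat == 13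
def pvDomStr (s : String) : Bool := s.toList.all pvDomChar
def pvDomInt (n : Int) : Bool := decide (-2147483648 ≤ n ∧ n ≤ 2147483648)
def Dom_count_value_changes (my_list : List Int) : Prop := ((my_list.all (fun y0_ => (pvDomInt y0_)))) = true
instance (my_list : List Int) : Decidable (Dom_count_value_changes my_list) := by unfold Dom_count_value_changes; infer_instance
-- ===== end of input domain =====

-- B replaces A's fused three-branch index loop by an adjacent-differences table and
-- three independent sign-counting passes (objective: simpler; same O(n) cost).

-- ===== PORT A =====
def count_value_changes (my_list : List Int) : Int × Int × Int :=
  (PySem.List.pyRange 1 (my_list.length : Int) 1).foldl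
    (fun (s : Int × Int × Int) i =>
      if PySem.List.pyGetD my_list i 0 > PySem.List.pyGetD my_list (i - 1) 0 then
        (s.1 + 1, s.2.1, s.2.2)
      else if PySem.List.pyGetD my_list i 0 = PySem.List.pyGetD my_list (i - 1) 0 then
        (s.1, s.2.1 + 1, s.2.2)
      else if PySem.List.pyGetD my_list i 0 < PySem.List.pyGetD my_list (i - 1) 0 then
        (s.1, s.2.1, s.2.2 + 1)
      else s)
    (0, 0, 0)

-- ===== PORT B =====
def count_value_changes_alt (my_list : List Int) : Int × Int × Int :=
  let diffs := (my_list.zip (PySem.List.slice my_list (some 1) none)).map (fun p => p.2 - p.1)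
  (((diffs.filter (fun d => d > 0)).length : Int),
   ((diffs.filter (fun d => d = 0)).length : Int),
   ((diffs.filter (fun d => d < 0)).length : Int))

-- ===== PRECONDITION & SPEC =====
def Spec_count_value_changes (my_list : List Int) (out : Int × Int × Int) : Prop := out = count_value_changes_alt my_list
instance (my_list : List Int) (out : Int × Int × Int) : Decidable (Spec_count_value_changes my_list out) := by unfold Spec_count_value_changes; infer_instance

-- ===== CLAIM (what is proved, stated in full; the proofs are below) =====
def Claim_equal_count_value_changes : Prop := ∀ (my_list : List Int), Dom_count_value_changes my_list → Spec_count_value_changes my_list (count_value_changes my_list)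

-- ===== LEMMAS AND PROOFS =====

/-- the unit contribution of one adjacent pair (prev, cur) -/
def pvU (p c : Int) : Int × Int × Int :=
  if c > p then (1, 0, 0) else if c = p then (0, 1, 0) else (0, 0, 1)

theorem pv_foldl_add {M : Type} [AddCommMonoid M] (g : Int → M) (l : List Int) (a : M) :
    l.foldl (fun acc x => acc + g x) a = a + (l.map g).sum := by
  induction l generalizing a with
  | nil => simp
  | cons x t ih => simp [ih, add_assoc]

theorem pv_step_eq (xs : List Int) :
    (fun (s : Int × Int × Int) i =>
      if PySem.List.pyGetD xs i 0 > PySem.List.pyGetD xs (i - 1) 0 then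
        (s.1 + 1, s.2.1, s.2.2)
      else if PySem.List.pyGetD xs i 0 = PySem.List.pyGetD xs (i - 1) 0 then
        (s.1, s.2.1 + 1, s.2.2)
      else if PySem.List.pyGetD xs i 0 < PySem.List.pyGetD xs (i - 1) 0 then
        (s.1, s.2.1, s.2.2 + 1)
      else s)
    = fun (s : Int × Int × Int) i => s + pvU (PySem.List.pyGetD xs (i - 1) 0) (PySem.List.pyGetD xs i 0) := by
  funext s i
  rcases s with ⟨x, y, z⟩
  unfold pvU
  split_ifs with h1 h2 h3 <;> simp_all [Prod.ext_iff] <;> omega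

/-- A's fold as a sum over the index range. -/
theorem pv_A_sum (xs : List Int) :
    count_value_changes xs
      = ((PySem.List.pyRange 1 (xs.length : Int) 1).map
          (fun i => pvU (PySem.List.pyGetD xs (i - 1) 0) (PySem.List.pyGetD xs i 0))).sum := by
  unfold count_value_changes
  rw [pv_step_eq, pv_foldl_add]
  simp

theorem pv_A_cons (a b : Int) (t : List Int) :
    count_value_changes (a :: b :: t) = pvU a b + count_value_changes (b :: t) := by
  rw [pv_A_sum, pv_A_sum]
  have h1 : ((a :: b :: t).length : Int) = (t.length : Int) + 2 := by simp; omega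
  have h2 : ((b :: t).length : Int) = (t.length : Int) + 1 := by simp
  rw [h1, h2, PySem.List.pyRange_one, PySem.List.pyRange_one]
  have e1 : ((t.length : Int) + 2 - 1).toNat = t.length + 1 := by omega
  have e2 : ((t.length : Int) + 1 - 1).toNat = t.length := by omega
  rw [e1, e2, List.range_succ_eq_map]
  simp only [List.map_cons, List.map_map, List.sum_cons]
  congr 1
  · show pvU (PySem.List.pyGetD (a :: b :: t) (1 + (0:Nat) - 1) 0)
          (PySem.List.pyGetD (a :: b :: t) (1 + (0:Nat)) 0) = pvU a b
    norm_num
    rw [show ((1:Int)) = ((1:Nat) : Int) by norm_num, PySem.List.pyGetD_natCast]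
    simp
  · congr 1
    apply List.map_congr_left
    intro k _
    simp only [Function.comp_apply]
    have c1 : (1 : Int) + (k.succ : Int) - 1 = ((k + 1 : Nat) : Int) := by push_cast; ring
    have c2 : (1 : Int) + (k.succ : Int) = ((k + 2 : Nat) : Int) := by push_cast; ring
    have c3 : (1 : Int) + (k : Int) - 1 = ((k : Nat) : Int) := by omega
    have c4 : (1 : Int) + (k : Int) = ((k + 1 : Nat) : Int) := by push_cast; ring
    rw [c1, c2, c3, c4, PySem.List.pyGetD_natCast, PySem.List.pyGetD_natCast,
        PySem.List.pyGetD_natCast, PySem.List.pyGetD_natCast]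
    simp

theorem pv_B_cons (a b : Int) (t : List Int) :
    count_value_changes_alt (a :: b :: t) = pvU a b + count_value_changes_alt (b :: t) := by
  unfold count_value_changes_alt pvU
  simp only [PySem.List.slice_from_one, List.tail_cons, List.zip_cons_cons, List.map_cons,
    List.filter_cons, decide_eq_true_eq, Prod.ext_iff]
  rcases lt_trichotomy a b with h | h | h
  · rw [if_pos (show b - a > 0 by omega), if_neg (show ¬ b - a = 0 by omega),
      if_neg (show ¬ b - a < 0 by omega), if_pos (show b > a by omega)]
    refine ⟨?_, ?_, ?_⟩ <;> simp <;> omega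
  · rw [if_neg (show ¬ b - a > 0 by omega), if_pos (show b - a = 0 by omega),
      if_neg (show ¬ b - a < 0 by omega), if_neg (show ¬ b > a by omega),
      if_pos (show b = a by omega)]
    refine ⟨?_, ?_, ?_⟩ <;> simp <;> omega
  · rw [if_neg (show ¬ b - a > 0 by omega), if_neg (show ¬ b - a = 0 by omega),
      if_pos (show b - a < 0 by omega), if_neg (show ¬ b > a by omega),
      if_neg (show ¬ b = a by omega)]
    refine ⟨?_, ?_, ?_⟩ <;> simp <;> omega

-- ===== VERDICT (by name: the statement is the Claim_ definition above) =====
theorem pv_AB : ∀ (xs : List Int), count_value_changes xs = count_value_changes_alt xs := by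
  intro xs
  induction xs with
  | nil => decide
  | cons a t ih =>
    cases t with
    | nil =>
      simp [count_value_changes, count_value_changes_alt, PySem.List.slice_from_one]
    | cons b t' => rw [pv_A_cons, pv_B_cons, ih]

theorem count_value_changes_spec : Claim_equal_count_value_changes :=
  fun my_list _ => pv_AB my_list
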